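-- pv_equiv track=rewrite | github.com/KKKKSHI30/Leetcode | _OA/Cisco/Func Drop.py | funcDrop2
-- ===== SOURCE A (Python) =====
-- def funcDrop2(xCoordinates, yCoordinates):
--     coordinate_pairs = set(zip(xCoordinates, yCoordinates))
--     first_element_counts = {}
--     second_element_counts = {}
--
--     for pair in coordinate_pairs:
--         first_element, second_element = pair
--         first_element_counts[first_element] = first_element_counts.get(first_element, 0) + 1
--         second_element_counts[second_element] = second_element_counts.get(second_element, 0) + 1
--
--     max_first_element = max(first_element_counts.values())
--     max_second_element = max(second_element_counts.values())
--
--     return max(max_first_element,max_second_element)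
-- ===== SOURCE B (Python) =====
-- def funcDrop2(xCoordinates, yCoordinates):
--     pairs = set(zip(xCoordinates, yCoordinates))
--     best = 0
--     for vals in (sorted(x for x, _ in pairs), sorted(y for _, y in pairs)):
--         run, prev = 0, None
--         for v in vals:
--             run = run + 1 if prev == v else 1
--             if run > best:
--                 best = run
--             prev = v
--     return best
-- ===== Notes on version B (the rewrite author's own statement) =====
-- stated objective: alternative
-- what changed: Replaces the two hash-map frequency counters over the deduped pairs by sorting the distinct x-values and y-values and scanning each sorted list once for the longest run of equal values; B returns 0 on an empty pair set where A raises.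
import Mathlib
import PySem

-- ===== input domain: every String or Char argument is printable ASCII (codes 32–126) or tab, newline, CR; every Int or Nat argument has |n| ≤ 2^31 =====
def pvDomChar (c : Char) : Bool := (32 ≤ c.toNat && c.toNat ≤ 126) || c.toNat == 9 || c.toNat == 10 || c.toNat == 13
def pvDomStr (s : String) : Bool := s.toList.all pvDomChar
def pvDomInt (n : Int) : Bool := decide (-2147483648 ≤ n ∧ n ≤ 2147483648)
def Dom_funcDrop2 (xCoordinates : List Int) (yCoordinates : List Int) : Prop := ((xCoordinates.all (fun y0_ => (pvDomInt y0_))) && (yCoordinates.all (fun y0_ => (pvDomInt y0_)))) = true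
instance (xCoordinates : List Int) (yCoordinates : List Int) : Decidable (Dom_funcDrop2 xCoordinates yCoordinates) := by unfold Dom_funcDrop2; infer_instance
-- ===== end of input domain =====

-- B replaces A's two hash-map frequency counters over the deduped pairs by sorting the
-- distinct x-values and y-values and scanning each sorted list once for its longest run
-- of equal values (objective: alternative); where A raises ValueError (empty pair set,
-- i.e. an empty input list) B returns 0 — those inputs are outside Pre_funcDrop2.

-- ===== PORT A =====
def funcDrop2 (xCoordinates : List Int) (yCoordinates : List Int) : Int :=
  let coordinate_pairs : PySem.Set (Int × Int) := PySem.Set.ofList (xCoordinates.zip yCoordinates)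
  let counts := coordinate_pairs.foldl
    (fun (d : PySem.Dict Int Int × PySem.Dict Int Int) pair =>
      (d.1.insert pair.1 (d.1.getD pair.1 0 + 1), d.2.insert pair.2 (d.2.getD pair.2 0 + 1)))
    (PySem.Dict.empty, PySem.Dict.empty)
  -- max(first_element_counts.values()) / max(second_element_counts.values());
  -- Python raises ValueError on an empty dict: Pre_funcDrop2 excludes that, `.getD 0` is dead there
  let max_first_element := (PySem.List.max? counts.1.values (fun v => v)).getD 0
  let max_second_element := (PySem.List.max? counts.2.values (fun v => v)).getD 0
  max max_first_element max_second_element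

-- ===== PORT B =====
-- loop body of Source B's inner loop: state (best, run, prev) (prev = None ↦ none)
def pvStep (s : Int × Int × Option Int) (v : Int) : Int × Int × Option Int :=
  let run : Int := if s.2.2 == some v then s.2.1 + 1 else 1
  (if run > s.1 then run else s.1, run, some v)

-- inner loop of Source B: run/prev/best scan of one sorted value list
def pvScan (vals : List Int) (best : Int) : Int :=
  (vals.foldl pvStep (best, 0, (none : Option Int))).1

def funcDrop2_alt (xCoordinates : List Int) (yCoordinates : List Int) : Int :=
  let pairs : PySem.Set (Int × Int) := PySem.Set.ofList (xCoordinates.zip yCoordinates)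
  let best1 := pvScan (PySem.List.sorted (pairs.map (fun p => p.1)) (fun v => v)) 0
  pvScan (PySem.List.sorted (pairs.map (fun p => p.2)) (fun v => v)) best1

-- ===== PRECONDITION & SPEC =====
-- Pre_ excludes exactly the inputs where Python A raises ValueError: either list empty
-- makes zip() empty, the dicts empty and max() of empty values raise.
def Pre_funcDrop2 (xCoordinates : List Int) (yCoordinates : List Int) : Prop :=
  xCoordinates ≠ [] ∧ yCoordinates ≠ []
instance (xCoordinates : List Int) (yCoordinates : List Int) : Decidable (Pre_funcDrop2 xCoordinates yCoordinates) := by unfold Pre_funcDrop2; infer_instance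
def pvWitness_funcDrop2 : List Int × List Int := ([1, 2, 1], [3, 3, 4])

def Spec_funcDrop2 (xCoordinates : List Int) (yCoordinates : List Int) (out : Int) : Prop := out = funcDrop2_alt xCoordinates yCoordinates
instance (xCoordinates : List Int) (yCoordinates : List Int) (out : Int) : Decidable (Spec_funcDrop2 xCoordinates yCoordinates out) := by unfold Spec_funcDrop2; infer_instance

-- ===== CLAIM (what is proved, stated in full; the proofs are below) =====
def Claim_equal_funcDrop2 : Prop := ∀ (xCoordinates : List Int) (yCoordinates : List Int), Dom_funcDrop2 xCoordinates yCoordinates → Pre_funcDrop2 xCoordinates yCoordinates → Spec_funcDrop2 xCoordinates yCoordinates (funcDrop2 xCoordinates yCoordinates)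

-- ===== LEMMAS AND PROOFS =====

-- the maximum multiplicity of a value in a list, by run decomposition (proof-side spec)
def pvMC : List Int → Int
  | [] => 0
  | v :: t => max ((t.count v : Int) + 1) (pvMC (t.filter (fun x => x ≠ v)))
termination_by l => l.length
decreasing_by
  have h1 := List.length_filter_le (fun x : {x // x ∈ t} => !decide ((x : Int) = v)) t.attach
  simp at h1 ⊢
  omega

lemma pvMC_nil : pvMC [] = 0 := by rw [pvMC]

lemma pvMC_cons (v : Int) (t : List Int) :
    pvMC (v :: t) = max ((t.count v : Int) + 1) (pvMC (t.filter (fun x => x ≠ v))) := by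
  rw [pvMC]

lemma pvMC_nonneg (m : List Int) : 0 ≤ pvMC m := by
  match m with
  | [] => rw [pvMC_nil]
  | v :: t =>
    rw [pvMC_cons]
    have : (0:Int) ≤ (t.count v : Int) + 1 := by positivity
    have h2 := pvMC_nonneg (t.filter (fun x => x ≠ v))
    omega
termination_by m.length
decreasing_by
  have h1 := List.length_filter_le (fun x : Int => !decide (x = v)) t
  simp at h1 ⊢
  omega

lemma pvMC_ge (m : List Int) : ∀ k ∈ m, (m.count k : Int) ≤ pvMC m := by
  match m with
  | [] => simp
  | v :: t =>
    intro k hk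
    rw [pvMC_cons]
    by_cases hkv : k = v
    · subst hkv
      rw [List.count_cons_self]
      push_cast
      exact le_max_of_le_left (by omega)
    · have hkt : k ∈ t := by
        rcases List.mem_cons.1 hk with h | h
        · exact absurd h hkv
        · exact h
      have hkf : k ∈ t.filter (fun x => x ≠ v) := by
        simp [List.mem_filter, hkt, hkv]
      have hrec := pvMC_ge (t.filter (fun x => x ≠ v)) k hkf
      have hcf : (t.filter (fun x => x ≠ v)).count k = t.count k := by
        rw [List.count_filter]
        simp [hkv]
      rw [hcf] at hrec
      have hcc : (v :: t).count k = t.count k := by simp [List.count_cons]; omega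
      rw [hcc]
      exact le_max_of_le_right hrec
termination_by m.length
decreasing_by
  have h1 := List.length_filter_le (fun x : Int => !decide (x = v)) t
  simp at h1 ⊢
  omega

lemma pvMC_exists (m : List Int) (h : m ≠ []) : ∃ k ∈ m, pvMC m = (m.count k : Int) := by
  match m with
  | [] => exact absurd rfl h
  | v :: t =>
    by_cases hle : pvMC (t.filter (fun x => x ≠ v)) ≤ (t.count v : Int) + 1
    · refine ⟨v, List.mem_cons_self, ?_⟩
      rw [pvMC_cons, max_eq_left hle, List.count_cons_self]
      push_cast
      ring
    · rw [not_le] at hle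
      have hne : t.filter (fun x => x ≠ v) ≠ [] := by
        intro hnil
        rw [hnil, pvMC_nil] at hle
        have : (0:Int) ≤ (t.count v : Int) := by positivity
        omega
      obtain ⟨k, hkf, hkeq⟩ := pvMC_exists (t.filter (fun x => x ≠ v)) hne
      have hkv : k ≠ v := by
        have := List.mem_filter.1 hkf
        simpa using this.2
      have hkt : k ∈ t := (List.mem_filter.1 hkf).1
      refine ⟨k, List.mem_cons_of_mem _ hkt, ?_⟩
      have hcf : (t.filter (fun x => x ≠ v)).count k = t.count k := by
        rw [List.count_filter]; simp [hkv]
      have hcc : (v :: t).count k = t.count k := by simp [List.count_cons]; omega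
      rw [pvMC_cons, max_eq_right (le_of_lt hle), hkeq, hcf, hcc]
termination_by m.length
decreasing_by
  have h1 := List.length_filter_le (fun x : Int => !decide (x = v)) t
  simp at h1 ⊢
  omega

lemma pvMC_perm {l l' : List Int} (h : l.Perm l') : pvMC l = pvMC l' := by
  rcases eq_or_ne l [] with rfl | hne
  · have : l' = [] := h.symm.eq_nil
    simp [this]
  · have hne' : l' ≠ [] := by
      intro hh; subst hh; exact hne h.eq_nil
    obtain ⟨k, hk, hkeq⟩ := pvMC_exists l hne
    obtain ⟨k', hk', hkeq'⟩ := pvMC_exists l' hne'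
    have h1 : pvMC l ≤ pvMC l' := by
      rw [hkeq, h.count_eq]
      exact pvMC_ge l' k (h.mem_iff.1 hk)
    have h2 : pvMC l' ≤ pvMC l := by
      rw [hkeq', ← h.count_eq]
      exact pvMC_ge l k' (h.mem_iff.2 hk')
    omega

-- A's max-of-counter-values (ported as `.getD 0` of max?) equals pvMC
lemma pvAM_eq (m : List Int) :
    ((PySem.List.max? ((PySem.Set.ofList m).map (fun k => (List.count k m : Int))) (fun v => v)).getD 0) = pvMC m := by
  rcases eq_or_ne m [] with rfl | hne
  · simp [PySem.Set.ofList, PySem.List.max?, pvMC_nil]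
  · cases hmx : PySem.List.max? ((PySem.Set.ofList m).map (fun k => (List.count k m : Int))) (fun v => v) with
    | none =>
      rw [PySem.List.max?_eq_none_iff] at hmx
      obtain ⟨a, ha⟩ := List.exists_mem_of_ne_nil m hne
      have : a ∈ PySem.Set.ofList m := (PySem.Set.mem_ofList m a).2 ha
      have : (List.count a m : Int) ∈ ([] : List Int) := by
        rw [← hmx]; exact List.mem_map_of_mem this
      simp at this
    | some α =>
      have hmem := PySem.List.max?_mem hmx
      have hmax := PySem.List.max?_isMax hmx
      obtain ⟨k, hk, hkα⟩ := List.mem_map.1 hmem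
      have hkm : k ∈ m := (PySem.Set.mem_ofList m k).1 hk
      have h1 : α ≤ pvMC m := by rw [← hkα]; exact pvMC_ge m k hkm
      obtain ⟨k', hk', hkeq⟩ := pvMC_exists m hne
      have h2 : pvMC m ≤ α := by
        rw [hkeq]
        exact hmax _ (List.mem_map_of_mem ((PySem.Set.mem_ofList m k').2 hk'))
      simp only [Option.getD_some]
      omega

-- one sorted-run scan step after another: the general invariant of Source B's inner loop
lemma pvStep_some_eq (b r v : Int) : pvStep (b, r, some v) v = ((if r + 1 > b then r + 1 else b), r + 1, some v) := by
  simp [pvStep]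

lemma pvStep_some_ne (b r p v : Int) (h : p ≠ v) : pvStep (b, r, some p) v = ((if 1 > b then 1 else b), 1, some v) := by
  simp [pvStep, h]

lemma pvStep_none (b r v : Int) : pvStep (b, r, (none : Option Int)) v = ((if 1 > b then 1 else b), 1, some v) := by
  simp [pvStep]

lemma pvScan_go (vals : List Int) (h : vals.Pairwise (· ≤ ·)) :
    ∀ (b r p : Int), (∀ v ∈ vals, p ≤ v) → 0 ≤ r → r ≤ b →
    (vals.foldl pvStep (b, r, some p)).1
      = max b (max ((vals.count p : Int) + r) (pvMC (vals.filter (fun x => x ≠ p)))) := by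
  induction vals with
  | nil =>
    intro b r p _ hr hrb
    simp only [List.foldl_nil, List.count_nil, List.filter_nil, pvMC_nil]
    simp only [Int.max_def]
    split_ifs <;> omega
  | cons v t ih =>
    intro b r p hp hr hrb
    have hpv : p ≤ v := hp v List.mem_cons_self
    have hvt : ∀ x ∈ t, v ≤ x := (List.pairwise_cons.1 h).1
    have ht : t.Pairwise (· ≤ ·) := (List.pairwise_cons.1 h).2
    have hC : (0:Int) ≤ (t.count v : Int) := by positivity
    rw [List.foldl_cons]
    by_cases hev : p = v
    · subst hev
      rw [pvStep_some_eq, ih ht (if r + 1 > b then r + 1 else b) (r + 1) p (fun x hx => le_trans hpv (hvt x hx)) (by omega) (by split_ifs <;> omega)]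
      have hCp : (0:Int) ≤ (t.count p : Int) := by positivity
      have hcnt : (((p :: t).count p : Nat) : Int) = (t.count p : Int) + 1 := by
        rw [List.count_cons_self]; push_cast; ring
      have hfil : (p :: t).filter (fun x => x ≠ p) = t.filter (fun x => x ≠ p) := by
        simp
      rw [hfil, hcnt]
      simp only [Int.max_def]
      split_ifs <;> omega
    · have hpt : p ∉ t := by
        intro hmem
        have := hvt p hmem
        omega
      rw [pvStep_some_ne b r p v hev, ih ht (if 1 > b then 1 else b) 1 v hvt (by omega) (by split_ifs <;> omega)]
      have hcnt : (((v :: t).count p : Nat) : Int) = 0 := by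
        have hnm : p ∉ v :: t := by
          intro hm
          rcases List.mem_cons.1 hm with hm | hm
          · exact hev hm
          · exact hpt hm
        simp [List.count_eq_zero.2 hnm]
      have hfil : (v :: t).filter (fun x => x ≠ p) = v :: t := by
        apply List.filter_eq_self.2
        intro a ha
        rcases List.mem_cons.1 ha with rfl | ha
        · simp; omega
        · have hap : a ≠ p := by intro hh; subst hh; exact hpt ha
          simp [hap]
      rw [hcnt, hfil, pvMC_cons]
      simp only [Int.max_def]
      split_ifs <;> omega

-- B's scan over a sorted list computes max best (pvMC vals)
lemma pvScan_eq (vals : List Int) (h : vals.Pairwise (· ≤ ·)) (b : Int) (hb : 0 ≤ b) :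
    pvScan vals b = max b (pvMC vals) := by
  cases vals with
  | nil =>
    simp only [pvScan, List.foldl_nil, pvMC_nil]
    omega
  | cons v t =>
    have hvt : ∀ x ∈ t, v ≤ x := (List.pairwise_cons.1 h).1
    have ht : t.Pairwise (· ≤ ·) := (List.pairwise_cons.1 h).2
    unfold pvScan
    rw [List.foldl_cons, pvStep_none,
        pvScan_go t ht (if 1 > b then 1 else b) 1 v hvt (by omega) (by split_ifs <;> omega)]
    have hC : (0:Int) ≤ (t.count v : Int) := by positivity
    have hM := pvMC_nonneg (t.filter (fun x => x ≠ v))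
    rw [pvMC_cons]
    simp only [Int.max_def]
    split_ifs <;> omega

-- ===== VERDICT (by name: the statement is the Claim_ definition above) =====
theorem funcDrop2_spec : Claim_equal_funcDrop2 := by
  intro xs ys _ _
  unfold Spec_funcDrop2 funcDrop2 funcDrop2_alt
  simp only []
  rw [PySem.List.foldl_prod_mk
        (f := fun (d : PySem.Dict Int Int) (pair : Int × Int) => d.insert pair.1 (d.getD pair.1 0 + 1))
        (g := fun (d : PySem.Dict Int Int) (pair : Int × Int) => d.insert pair.2 (d.getD pair.2 0 + 1))]
  rw [← List.foldl_map (f := fun p : Int × Int => p.1)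
        (g := fun (d : PySem.Dict Int Int) (x : Int) => d.insert x (d.getD x 0 + 1)),
      ← List.foldl_map (f := fun p : Int × Int => p.2)
        (g := fun (d : PySem.Dict Int Int) (x : Int) => d.insert x (d.getD x 0 + 1))]
  rw [PySem.Dict.foldl_insert_getD_add_one_eq_counter, PySem.Dict.foldl_insert_getD_add_one_eq_counter]
  set m1 := (PySem.Set.ofList (xs.zip ys)).map (fun p : Int × Int => p.1) with hm1
  set m2 := (PySem.Set.ofList (xs.zip ys)).map (fun p : Int × Int => p.2) with hm2
  have hv1 : (PySem.Dict.counter m1).values = (PySem.Set.ofList m1).map (fun k => (List.count k m1 : Int)) := by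
    simp [PySem.Dict.values, PySem.Dict.items_counter, List.map_map, Function.comp]
  have hv2 : (PySem.Dict.counter m2).values = (PySem.Set.ofList m2).map (fun k => (List.count k m2 : Int)) := by
    simp [PySem.Dict.values, PySem.Dict.items_counter, List.map_map, Function.comp]
  rw [hv1, hv2, pvAM_eq, pvAM_eq]
  have hs1 : pvScan (PySem.List.sorted m1 (fun v => v)) 0 = pvMC m1 := by
    rw [pvScan_eq _ (by simpa using PySem.List.sorted_pairwise m1 (fun v => v)) 0 le_rfl]
    rw [pvMC_perm (PySem.List.sorted_perm m1 (fun v => v) false)]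
    exact max_eq_right (pvMC_nonneg m1)
  have hs2 : pvScan (PySem.List.sorted m2 (fun v => v)) (pvMC m1) = max (pvMC m1) (pvMC m2) := by
    rw [pvScan_eq _ (by simpa using PySem.List.sorted_pairwise m2 (fun v => v)) (pvMC m1) (pvMC_nonneg m1)]
    rw [pvMC_perm (PySem.List.sorted_perm m2 (fun v => v) false)]
  rw [hs1, hs2]
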